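-- pv_equiv track=rewrite | github.com/mizm/TIL | python/swexpert/sw5550.py | chkcnt
-- ===== SOURCE A (Python) =====
-- def chkcnt(z) :
--     t = z.count('c')
--     s = 'roak'
--     if z[0] != 'c':
--         return False
--     for c in s:
--         q=z.count(c)
--         if t != q :
--             return False
--     return True
-- ===== SOURCE B (Python) =====
-- def model(n):
--     return ['a'] * n + ['c'] * n + ['k'] * n + ['o'] * n + ['r'] * n
--
-- def chkcnt(z):
--     if z[0] != 'c':
--         return False
--     t = sorted(ch for ch in z if ch in 'ackor')
--     n, r = divmod(len(t), 5)
--     return r == 0 and t == model(n)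
-- ===== Notes on version B (the rewrite author's own statement) =====
-- stated objective: alternative
-- what changed: B filters out the characters of 'croak', sorts them, and compares the sorted list to the canonical shape ['a']*n+['c']*n+['k']*n+['o']*n+['r']*n with n = len/5, instead of A's five separate .count scans compared pairwise.
import Mathlib
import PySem

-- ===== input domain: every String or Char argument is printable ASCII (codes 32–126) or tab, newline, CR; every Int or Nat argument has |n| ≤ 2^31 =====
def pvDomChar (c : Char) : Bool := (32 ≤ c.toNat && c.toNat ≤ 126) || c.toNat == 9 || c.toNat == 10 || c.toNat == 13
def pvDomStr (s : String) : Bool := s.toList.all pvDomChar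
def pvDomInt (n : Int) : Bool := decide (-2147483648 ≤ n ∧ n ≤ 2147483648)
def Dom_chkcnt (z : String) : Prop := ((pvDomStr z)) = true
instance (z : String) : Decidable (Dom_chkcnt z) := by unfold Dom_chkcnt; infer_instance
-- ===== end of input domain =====

-- B replaces A's five repeated .count scans with filter-then-sort: the sorted 'croak'
-- characters of z must equal the canonical block shape ['a']*n+['c']*n+['k']*n+['o']*n+['r']*n; objective: alternative.

-- ===== PORT A =====
-- the 'for c in s' loop with early 'return False'
def chkcntLoop (z : String) (t : Int) : List Char → Bool
  | [] => true
  | c :: cs =>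
    let q : Int := (PySem.Str.count z (String.ofList [c]) : Int)
    if t ≠ q then false else chkcntLoop z t cs

def chkcnt (z : String) : Bool :=
  let t : Int := (PySem.Str.count z "c" : Int)
  match PySem.Str.pyGet? z 0 with
  | none => false   -- unreachable under Pre_chkcnt (z[0] raises IndexError on "")
  | some c0 =>
    if c0 ≠ 'c' then false
    else chkcntLoop z t "roak".toList

-- ===== PORT B =====
-- Source B's helper model(n)
def pvModel (n : Nat) : List Char :=
  List.replicate n 'a' ++ List.replicate n 'c' ++ List.replicate n 'k' ++ List.replicate n 'o' ++ List.replicate n 'r'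

def chkcnt_alt (z : String) : Bool :=
  match PySem.Str.pyGet? z 0 with
  | none => false   -- unreachable under Pre_chkcnt
  | some c0 =>
    if c0 ≠ 'c' then false
    else
      -- ch in 'ackor' for a single char = membership among its characters (exact)
      let t := PySem.List.sorted (z.toList.filter (fun ch => (['a','c','k','o','r'].contains ch))) (fun x => x) false
      -- n, r = divmod(len(t), 5): len(t) ≥ 0, so Python's divmod is Nat division here (exact)
      let n := t.length / 5
      let r := t.length % 5
      (r == 0) && (t == pvModel n)

-- ===== PRECONDITION & SPEC =====
-- Pre_ excludes only the empty string, on which A raises IndexError at z[0].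
def Pre_chkcnt (z : String) : Prop := z ≠ ""
instance (z : String) : Decidable (Pre_chkcnt z) := by unfold Pre_chkcnt; infer_instance
def pvWitness_chkcnt : String := "croak"

def Spec_chkcnt (z : String) (out : Bool) : Prop := out = chkcnt_alt z
instance (z : String) (out : Bool) : Decidable (Spec_chkcnt z out) := by unfold Spec_chkcnt; infer_instance

-- ===== CLAIM (what is proved, stated in full; the proofs are below) =====
def Claim_equal_chkcnt : Prop := ∀ (z : String), Dom_chkcnt z → Pre_chkcnt z → Spec_chkcnt z (chkcnt z)

-- ===== LEMMAS AND PROOFS =====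

-- substring count for a one-character needle is the character count
theorem chars_count_go_singleton (c : Char) (l : List Char) (fuel acc : Nat)
    (h : l.length ≤ fuel) :
    PySem.Chars.count.go [c] fuel l acc = acc + l.count c := by
  induction fuel generalizing l acc with
  | zero =>
    interval_cases hl : l.length
    · simp [List.length_eq_zero_iff] at hl
      simp [hl, PySem.Chars.count.go]
  | succ n ih =>
    cases l with
    | nil => simp [PySem.Chars.count.go]
    | cons a t =>
      simp only [PySem.Chars.count.go]
      by_cases hc : a = c
      · simp [hc, List.isPrefixOf, ih t (acc + 1) (by simpa using Nat.lt_succ_iff.mp (by simpa using h))]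
        omega
      · have : List.isPrefixOf [c] (a :: t) = false := by
          simp [List.isPrefixOf]; exact fun h' => (hc h'.symm).elim
        simp [this, hc,
          ih t acc (by simpa using Nat.lt_succ_iff.mp (by simpa using h))]

theorem str_count_singleton (z : String) (c : Char) :
    PySem.Str.count z (String.ofList [c]) = z.toList.count c := by
  rw [PySem.Str.count_eq]
  simpa [PySem.Chars.count] using chars_count_go_singleton c z.toList z.toList.length 0 le_rfl

theorem pvModel_pairwise (n : Nat) : (pvModel n).Pairwise (· ≤ ·) := by
  unfold pvModel
  simp only [List.pairwise_append, List.pairwise_replicate, List.mem_append, List.mem_replicate]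
  refine ⟨⟨⟨⟨Or.inr (by decide), Or.inr (by decide), ?_⟩, Or.inr (by decide), ?_⟩,
    Or.inr (by decide), ?_⟩, Or.inr (by decide), ?_⟩
  · rintro a ⟨-, rfl⟩ b ⟨-, rfl⟩; decide
  · rintro a (⟨-, rfl⟩ | ⟨-, rfl⟩) b ⟨-, rfl⟩ <;> decide
  · rintro a ((⟨-, rfl⟩ | ⟨-, rfl⟩) | ⟨-, rfl⟩) b ⟨-, rfl⟩ <;> decide
  · rintro a (((⟨-, rfl⟩ | ⟨-, rfl⟩) | ⟨-, rfl⟩) | ⟨-, rfl⟩) b ⟨-, rfl⟩ <;> decide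

theorem pvModel_count (n : Nat) (c : Char) :
    List.count c (pvModel n) = if c = 'a' ∨ c = 'c' ∨ c = 'k' ∨ c = 'o' ∨ c = 'r' then n else 0 := by
  by_cases h : c = 'a' ∨ c = 'c' ∨ c = 'k' ∨ c = 'o' ∨ c = 'r'
  · rw [if_pos h]
    rcases h with rfl | rfl | rfl | rfl | rfl <;>
      simp [pvModel, List.count_append, List.count_replicate]
  · rw [if_neg h]
    simp only [not_or] at h
    obtain ⟨h1, h2, h3, h4, h5⟩ := h
    simp [pvModel, List.count_append, List.count_replicate, beq_iff_eq,
      Ne.symm h1, Ne.symm h2, Ne.symm h3, Ne.symm h4, Ne.symm h5]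

theorem pvModel_length (n : Nat) : (pvModel n).length = 5 * n := by
  simp [pvModel]; omega

-- the filtered list's counts on the five letters are z's counts, 0 elsewhere
theorem filter_count (l : List Char) (c : Char) :
    List.count c (l.filter (fun ch => (['a','c','k','o','r'].contains ch))) =
    if c = 'a' ∨ c = 'c' ∨ c = 'k' ∨ c = 'o' ∨ c = 'r' then List.count c l else 0 := by
  split_ifs with h
  · rcases h with rfl | rfl | rfl | rfl | rfl <;> exact List.count_filter (by decide)
  · refine List.count_eq_zero.mpr (fun hmem => h ?_)
    have := List.mem_filter.mp hmem
    simpa using this.2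

-- core: B's sorted-shape test holds iff the five counts agree with the count of 'c'
theorem alt_iff (l f : List Char)
    (hf : f = l.filter (fun ch => (['a','c','k','o','r'].contains ch))) :
    (((f.length % 5 == 0) && (PySem.List.sorted f (fun x => x) false == pvModel (f.length / 5))) = true)
    ↔ (List.count 'r' l = List.count 'c' l ∧ List.count 'o' l = List.count 'c' l ∧
       List.count 'a' l = List.count 'c' l ∧ List.count 'k' l = List.count 'c' l) := by
  subst hf
  constructor
  · intro h
    simp only [Bool.and_eq_true, beq_iff_eq] at h
    obtain ⟨-, hs⟩ := h
    have hperm : (l.filter (fun ch => (['a','c','k','o','r'].contains ch))).Perm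
        (pvModel ((l.filter (fun ch => (['a','c','k','o','r'].contains ch))).length / 5)) := by
      rw [← hs]; exact (PySem.List.sorted_perm _ _ _).symm
    have key : ∀ c, (c = 'a' ∨ c = 'c' ∨ c = 'k' ∨ c = 'o' ∨ c = 'r') →
        List.count c l = (l.filter (fun ch => (['a','c','k','o','r'].contains ch))).length / 5 := by
      intro c hc
      have h2 := hperm.count_eq c
      rw [filter_count, pvModel_count, if_pos hc, if_pos hc] at h2
      exact h2
    rw [key 'r' (by simp), key 'o' (by simp), key 'a' (by simp), key 'k' (by simp),
      key 'c' (by simp)]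
    exact ⟨rfl, rfl, rfl, rfl⟩
  · rintro ⟨hr, ho, ha, hk⟩
    have hperm : (pvModel (List.count 'c' l)).Perm
        (l.filter (fun ch => (['a','c','k','o','r'].contains ch))) := by
      rw [List.perm_iff_count]
      intro c
      rw [pvModel_count, filter_count]
      split_ifs with h
      · rcases h with rfl | rfl | rfl | rfl | rfl <;> simp [ha, hr, ho, hk]
      · rfl
    have hlen : (l.filter (fun ch => (['a','c','k','o','r'].contains ch))).length
        = 5 * List.count 'c' l := by
      rw [← hperm.length_eq, pvModel_length]
    have hsort := PySem.List.sorted_id_eq_of_perm_of_pairwise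
      (l.filter (fun ch => (['a','c','k','o','r'].contains ch)))
      (pvModel (List.count 'c' l)) hperm (pvModel_pairwise _)
    have hdiv : 5 * List.count 'c' l / 5 = List.count 'c' l := by omega
    rw [hlen, hdiv, hsort]
    simp

theorem bool_chain (t a b c d : Int) :
    ((if t ≠ a then false else if t ≠ b then false else if t ≠ c then false
      else if t ≠ d then false else true) = true)
    ↔ (a = t ∧ b = t ∧ c = t ∧ d = t) := by
  split_ifs <;> simp_all <;> omega

-- ===== VERDICT (by name: the statement is the Claim_ definition above) =====
theorem chkcnt_spec : Claim_equal_chkcnt := by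
  intro z _ hpre
  unfold Spec_chkcnt chkcnt chkcnt_alt
  cases hg : PySem.Str.pyGet? z 0 with
  | none =>
    exfalso
    apply hpre
    cases hz : z.toList with
    | nil => exact String.toList_inj.mp (by simp [hz])
    | cons a t =>
      rw [show (0 : Int) = ((0 : Nat) : Int) from rfl, PySem.Str.pyGet?_natCast, hz] at hg
      simp at hg
  | some c0 =>
    by_cases hc : c0 = 'c'
    · simp only [hc, ne_eq, not_true_eq_false, if_false]
      rw [show "roak".toList = ['r','o','a','k'] from rfl]
      simp only [chkcntLoop, str_count_singleton]
      have h1 : PySem.Str.count z "c" = z.toList.count 'c' := by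
        simpa using str_count_singleton z 'c'
      rw [h1, Bool.eq_iff_iff, bool_chain, PySem.List.length_sorted,
        alt_iff z.toList _ rfl]
      constructor
      · rintro ⟨h1, h2, h3, h4⟩
        exact ⟨by exact_mod_cast h1, by exact_mod_cast h2, by exact_mod_cast h3, by exact_mod_cast h4⟩
      · rintro ⟨h1, h2, h3, h4⟩
        exact ⟨by exact_mod_cast h1, by exact_mod_cast h2, by exact_mod_cast h3, by exact_mod_cast h4⟩
    · simp [hc]
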